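-- pv_equiv track=rewrite | github.com/kamilGie/WDI | Zestaw_2:_Tablice_jednowymiarowe/75/Rozwiązania/wiki.py | Zadanie_75
-- ===== SOURCE A (Python) =====
-- def Zadanie_75(T):
--     if len(T) < 1:
--         return False
--
--     min = max = T[0]
--     min_jedyny = max_jedyny = True
--
--     for el in T[1:]:
--         if min > el:
--             min = el
--             min_jedyny = True
--         elif min == el:
--             min_jedyny = False
--
--         if max < el:
--             max = el
--             max_jedyny = True
--         elif max == el:
--             max_jedyny = False
--
--     return min_jedyny and max_jedyny
-- ===== SOURCE B (Python) =====
-- def Zadanie_75(T):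
--     if not T:
--         return False
--     return T.count(min(T)) == 1 and T.count(max(T)) == 1
-- ===== Notes on version B (the rewrite author's own statement) =====
-- stated objective: simpler
-- what changed: Replaces the single manual pass tracking both extremes and their uniqueness flags with builtin min/max plus count-based uniqueness tests.
import Mathlib
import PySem

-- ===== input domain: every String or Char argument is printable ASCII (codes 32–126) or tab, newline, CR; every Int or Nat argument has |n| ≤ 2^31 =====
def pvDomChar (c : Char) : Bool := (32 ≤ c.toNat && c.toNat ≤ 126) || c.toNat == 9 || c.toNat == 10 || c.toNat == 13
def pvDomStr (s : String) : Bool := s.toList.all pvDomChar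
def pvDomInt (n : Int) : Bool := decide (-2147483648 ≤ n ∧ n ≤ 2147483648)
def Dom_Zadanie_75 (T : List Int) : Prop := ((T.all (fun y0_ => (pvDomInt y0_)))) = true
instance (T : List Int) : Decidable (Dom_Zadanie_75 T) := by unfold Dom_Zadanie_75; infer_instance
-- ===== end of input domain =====

set_option maxRecDepth 10000


-- B replaces A's single pass with both extremes and uniqueness flags by builtin min/max plus count-based uniqueness tests (objective: simpler).

-- ===== PORT A =====
-- one loop step of A's for-loop: state = (min, max, min_jedyny, max_jedyny)
def Zadanie_75_step (st : Int × Int × Bool × Bool) (el : Int) : Int × Int × Bool × Bool :=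
  let (mn, mx, mu, Mu) := st
  let (mn, mu) := if mn > el then (el, true) else if mn == el then (mn, false) else (mn, mu)
  let (mx, Mu) := if mx < el then (el, true) else if mx == el then (mx, false) else (mx, Mu)
  (mn, mx, mu, Mu)

def Zadanie_75 (T : List Int) : Bool :=
  match T with
  | [] => false
  | t0 :: rest =>
    let s := rest.foldl Zadanie_75_step (t0, t0, true, true)
    s.2.2.1 && s.2.2.2

-- ===== PORT B =====
def Zadanie_75_alt (T : List Int) : Bool :=
  match PySem.List.min? T (fun x => x), PySem.List.max? T (fun x => x) with
  | some m, some M => (PySem.List.count T m == 1) && (PySem.List.count T M == 1)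
  | _, _ => false

-- ===== PRECONDITION & SPEC =====
def Spec_Zadanie_75 (T : List Int) (out : Bool) : Prop := out = Zadanie_75_alt T
instance (T : List Int) (out : Bool) : Decidable (Spec_Zadanie_75 T out) := by unfold Spec_Zadanie_75; infer_instance

-- ===== CLAIM (what is proved, stated in full; the proofs are below) =====
def Claim_equal_Zadanie_75 : Prop := ∀ (T : List Int), Dom_Zadanie_75 T → Spec_Zadanie_75 T (Zadanie_75 T)

-- ===== LEMMAS AND PROOFS =====

theorem foldl_min_le_init (l : List Int) : ∀ (a : Int), l.foldl min a ≤ a := by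
  induction l with
  | nil => intro a; simp
  | cons x t ih =>
    intro a
    calc (x :: t).foldl min a = t.foldl min (min a x) := rfl
      _ ≤ min a x := ih _
      _ ≤ a := min_le_left _ _

theorem le_foldl_max_init (l : List Int) : ∀ (a : Int), a ≤ l.foldl max a := by
  induction l with
  | nil => intro a; simp
  | cons x t ih =>
    intro a
    calc a ≤ max a x := le_max_left _ _
      _ ≤ t.foldl max (max a x) := ih _
      _ = (x :: t).foldl max a := rfl

-- per-element update of the 'min is unique so far' flag, restated through counts
theorem flag_step_min (t : List Int) (mn el : Int) (mu : Bool) :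
    (if t.foldl min (min mn el) = min mn el then
       (if mn > el then true else if mn = el then false else mu) && (t.count (min mn el) == 0)
     else (t.count (t.foldl min (min mn el)) == 1))
    = (if t.foldl min (min mn el) = mn then mu && ((el :: t).count mn == 0)
       else ((el :: t).count (t.foldl min (min mn el)) == 1)) := by
  have hle : t.foldl min (min mn el) ≤ min mn el := foldl_min_le_init t _
  set F := t.foldl min (min mn el) with hF
  rcases lt_trichotomy mn el with h | h | h
  · have hm' : min mn el = mn := min_eq_left h.le
    rw [hm'] at hle ⊢
    have hFel : el ≠ F := by omega
    have hne : decide (mn = el) = false := by simp [h.ne]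
    simp [List.count_cons, hFel, h.ne', not_lt.mpr h.le, hne]
  · subst h
    simp only [min_self] at hle ⊢
    by_cases hF1 : F = mn
    · simp [hF1, List.count_cons]
    · simp [hF1, Ne.symm hF1, List.count_cons]
  · have hm' : min mn el = el := min_eq_right h.le
    rw [hm'] at hle ⊢
    have hFmn : F ≠ mn := by omega
    by_cases hF1 : F = el
    · simp [hF1, hFmn, List.count_cons, h]
      omega
    · simp [hF1, Ne.symm hF1, hFmn, List.count_cons]

-- per-element update of the 'max is unique so far' flag, restated through counts
theorem flag_step_max (t : List Int) (mx el : Int) (Mu : Bool) :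
    (if t.foldl max (max mx el) = max mx el then
       (if mx < el then true else if mx = el then false else Mu) && (t.count (max mx el) == 0)
     else (t.count (t.foldl max (max mx el)) == 1))
    = (if t.foldl max (max mx el) = mx then Mu && ((el :: t).count mx == 0)
       else ((el :: t).count (t.foldl max (max mx el)) == 1)) := by
  have hle : max mx el ≤ t.foldl max (max mx el) := le_foldl_max_init t _
  set F := t.foldl max (max mx el) with hF
  rcases lt_trichotomy mx el with h | h | h
  · have hm' : max mx el = el := max_eq_right h.le
    rw [hm'] at hle ⊢
    have hFmx : F ≠ mx := by omega
    by_cases hF1 : F = el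
    · simp [hF1, hFmx, List.count_cons, h]
      omega
    · simp [hF1, Ne.symm hF1, hFmx, List.count_cons]
  · subst h
    simp only [max_self] at hle ⊢
    by_cases hF1 : F = mx
    · simp [hF1, List.count_cons]
    · simp [hF1, Ne.symm hF1, List.count_cons]
  · have hm' : max mx el = mx := max_eq_left h.le
    rw [hm'] at hle ⊢
    have hFel : el ≠ F := by omega
    have hne : decide (mx = el) = false := by simp [h.ne']
    simp [List.count_cons, hFel, h.ne, not_lt.mpr h.le, hne]

-- invariant of A's loop: final min/max are fold-min/max, and each flag says
-- 'the final extremum occurs exactly once in the data seen so far'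
theorem Zadanie_75_loop_inv (l : List Int) : ∀ (mn mx : Int) (mu Mu : Bool),
    l.foldl Zadanie_75_step (mn, mx, mu, Mu) =
      (l.foldl min mn, l.foldl max mx,
       (if l.foldl min mn = mn then mu && (l.count mn == 0) else (l.count (l.foldl min mn) == 1)),
       (if l.foldl max mx = mx then Mu && (l.count mx == 0) else (l.count (l.foldl max mx) == 1))) := by
  induction l with
  | nil => intro mn mx mu Mu; simp
  | cons el t ih =>
    intro mn mx mu Mu
    have hstep : Zadanie_75_step (mn, mx, mu, Mu) el =
        (min mn el, max mx el,
         (if mn > el then true else if mn = el then false else mu),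
         (if mx < el then true else if mx = el then false else Mu)) := by
      simp only [Zadanie_75_step, beq_iff_eq, min_def, max_def]
      split_ifs <;> simp_all <;> omega
    simp only [List.foldl_cons, hstep, ih]
    exact Prod.ext rfl (Prod.ext rfl (Prod.ext (flag_step_min t mn el mu) (flag_step_max t mx el Mu)))

-- ===== VERDICT (by name: the statement is the Claim_ definition above) =====
theorem Zadanie_75_spec : Claim_equal_Zadanie_75 := by
  intro T _
  unfold Spec_Zadanie_75
  match T with
  | [] => rfl
  | t0 :: rest =>
    show Zadanie_75 (t0 :: rest) = Zadanie_75_alt (t0 :: rest)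
    have hmn := foldl_min_le_init rest t0
    have hmx := le_foldl_max_init rest t0
    unfold Zadanie_75 Zadanie_75_alt
    rw [PySem.List.min?_id_cons, PySem.List.max?_id_cons]
    simp only [Zadanie_75_loop_inv, PySem.List.count_eq, List.count_cons]
    set Fm := rest.foldl min t0 with hFm
    set FM := rest.foldl max t0 with hFM
    by_cases h1 : Fm = t0
    · by_cases h2 : FM = t0
      · simp [h1, h2]
      · simp [h1, h2, Ne.symm h2] <;> omega
    · by_cases h2 : FM = t0
      · simp [h1, Ne.symm h1, h2]
      · simp [h1, Ne.symm h1, h2, Ne.symm h2]
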